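-- pv_equiv track=rewrite | github.com/yonsweng/ps | boj/boj_27562.py | backtrack
-- ===== SOURCE A (Python) =====
-- INF = 987654321
--
-- def backtrack(air_conditioners, remaining_temp, i, current_cost):
--     if i == len(air_conditioners):
--         for temp in remaining_temp:
--             if temp > 0:
--                 return INF
--         return current_cost
--
--     a, b, p, m = air_conditioners[i]
--
--     cost1 = backtrack(air_conditioners, remaining_temp, i + 1, current_cost)
--
--     for j in range(a, b + 1):
--         remaining_temp[j] -= p
--     cost2 = backtrack(air_conditioners, remaining_temp, i + 1, current_cost + m)
--     for j in range(a, b + 1):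
--         remaining_temp[j] += p
--
--     return min(cost1, cost2)
-- ===== SOURCE B (Python) =====
-- INF = 987654321
--
--
-- def backtrack(air_conditioners, remaining_temp, i, current_cost):
--     n = len(air_conditioners) - i
--     outcomes = []
--     for mask in range(2 ** n):
--         temps = list(remaining_temp)
--         total = current_cost
--         for k in range(n):
--             if (mask >> k) & 1:
--                 a, b, p, m = air_conditioners[i + k]
--                 for j in range(a, b + 1):
--                     temps[j] -= p
--                 total += m
--         outcomes.append(total if all(t <= 0 for t in temps) else INF)
--     return min(outcomes)
-- ===== Notes on version B (the rewrite author's own statement) =====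
-- stated objective: alternative
-- what changed: The include/exclude recursion with in-place temperature mutation and undo is replaced by a flat loop over all bitmasks of the remaining ACs: each mask's subset is applied to a fresh copy of the temperatures, its cost summed, and the answer is min() over the per-mask outcomes (INF for infeasible masks).
import Mathlib
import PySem

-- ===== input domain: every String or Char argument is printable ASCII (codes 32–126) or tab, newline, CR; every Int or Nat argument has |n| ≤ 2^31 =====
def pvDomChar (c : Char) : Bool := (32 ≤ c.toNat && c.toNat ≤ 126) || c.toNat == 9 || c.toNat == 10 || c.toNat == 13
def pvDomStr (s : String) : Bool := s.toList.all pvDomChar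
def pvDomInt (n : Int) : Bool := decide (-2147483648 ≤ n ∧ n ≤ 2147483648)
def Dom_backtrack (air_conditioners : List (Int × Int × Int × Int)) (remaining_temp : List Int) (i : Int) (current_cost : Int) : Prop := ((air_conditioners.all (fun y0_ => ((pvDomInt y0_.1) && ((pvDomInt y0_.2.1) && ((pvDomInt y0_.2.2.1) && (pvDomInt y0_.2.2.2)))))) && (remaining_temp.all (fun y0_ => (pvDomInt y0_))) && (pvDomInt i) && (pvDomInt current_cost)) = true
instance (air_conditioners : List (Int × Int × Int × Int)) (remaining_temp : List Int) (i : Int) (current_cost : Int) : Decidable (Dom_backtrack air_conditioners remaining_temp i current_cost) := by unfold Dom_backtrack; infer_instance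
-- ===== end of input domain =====

-- B replaces the include/exclude recursion by a flat enumeration of all bitmasks over the remaining
-- ACs (alternative decomposition, not faster); A mutates remaining_temp in place but fully restores
-- it before returning, so the equivalence proved here (about return values) covers all observable behaviour.

-- ===== PORT A =====

def pyINF : Int := 987654321

/-- `for j in range(a, b+1): t[j] -= p` — exact via PySem indexing; the `none` case is
Python's IndexError, excluded by `Pre_backtrack` (both Pythons run this same loop). -/
def subRange (t : List Int) (a b p : Int) : List Int :=
  (PySem.List.pyRange a (b + 1) 1).foldl (fun t j =>
    match PySem.List.pyGet? t j with
    | none => t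
    | some x => PySem.List.pySetD t j (x - p)) t

/-- `for temp in remaining_temp: if temp > 0: return INF` then `return current_cost`. -/
def checkTemps : List Int → Int → Int
  | [], c => c
  | t :: ts, c => if t > 0 then pyINF else checkTemps ts c

def backtrack (air_conditioners : List (Int × Int × Int × Int)) (remaining_temp : List Int) (i : Int) (current_cost : Int) : Int :=
  if _h : i = (air_conditioners.length : Int) then checkTemps remaining_temp current_cost
  else
    match hx : PySem.List.pyGet? air_conditioners i with
    | none => pyINF  -- Python raises IndexError here (outside Pre_backtrack)
    | some (a, b, p, m) =>
      let cost1 := backtrack air_conditioners remaining_temp (i + 1) current_cost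
      let cost2 := backtrack air_conditioners (subRange remaining_temp a b p) (i + 1) (current_cost + m)
      -- the `+= p` restore loop rebuilds the caller's list; with value semantics it cannot affect the result
      min cost1 cost2
termination_by ((air_conditioners.length : Int) - i).toNat
decreasing_by
  all_goals
    have hin : PySem.Raise.InRange air_conditioners.length i := by
      by_contra hc
      rw [← PySem.List.pyGet?_eq_none_iff (xs := air_conditioners) (i := i)] at hc
      rw [hc] at hx; cases hx
    unfold PySem.Raise.InRange at hin
    omega

-- ===== PORT B =====

def backtrack_alt (air_conditioners : List (Int × Int × Int × Int)) (remaining_temp : List Int) (i : Int) (current_cost : Int) : Int :=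
  let n : Nat := ((air_conditioners.length : Int) - i).toNat
  let outcomes := (List.range (2 ^ n)).foldl (fun (outcomes : List Int) (mask : Nat) =>
    let st := (List.range n).foldl (fun (st : List Int × Int) (k : Nat) =>
      if (mask >>> k) &&& 1 == 1 then
        match PySem.List.pyGet? air_conditioners (i + (k : Int)) with
        | none => st  -- Python raises IndexError here (outside Pre_backtrack)
        | some (a, b, p, m) => (subRange st.1 a b p, st.2 + m)
      else st) (remaining_temp, current_cost)
    outcomes ++ [if st.1.all (fun t => t ≤ 0) then st.2 else pyINF]) []
  -- min(outcomes); outcomes is never empty (2^n ≥ 1), so the default is never used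
  (PySem.List.min? outcomes (fun x => x)).getD pyINF

-- ===== PRECONDITION & SPEC =====

/-- The subtraction range `[a, b]` of an AC only touches indices Python accepts. -/
def acOK (tlen : Nat) (ac : Int × Int × Int × Int) : Prop :=
  ac.1 ≤ ac.2.1 → (-(tlen : Int) ≤ ac.1 ∧ ac.2.1 < (tlen : Int))

-- Pre_ is exactly the set of inputs on which the Python A returns: it raises IndexError whenever the
-- cursor i lies outside [-len(acs), len(acs)] or some AC from position i onward has a nonempty cooling
-- range reaching outside the temperature list (every such AC is processed on every path).
def Pre_backtrack (air_conditioners : List (Int × Int × Int × Int)) (remaining_temp : List Int) (i : Int) (current_cost : Int) : Prop :=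
  -(air_conditioners.length : Int) ≤ i ∧ i ≤ (air_conditioners.length : Int) ∧
  ∀ k : Nat, k < ((air_conditioners.length : Int) - i).toNat →
    acOK remaining_temp.length ((PySem.List.pyGet? air_conditioners (i + (k : Int))).getD (0, 0, 0, 0))

instance (air_conditioners : List (Int × Int × Int × Int)) (remaining_temp : List Int) (i : Int) (current_cost : Int) : Decidable (Pre_backtrack air_conditioners remaining_temp i current_cost) := by
  unfold Pre_backtrack acOK; infer_instance

def pvWitness_backtrack : (List (Int × Int × Int × Int)) × List Int × Int × Int :=
  ([(0, 0, 1, 1)], [1], 0, 0)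

def Spec_backtrack (air_conditioners : List (Int × Int × Int × Int)) (remaining_temp : List Int) (i : Int) (current_cost : Int) (out : Int) : Prop := out = backtrack_alt air_conditioners remaining_temp i current_cost
instance (air_conditioners : List (Int × Int × Int × Int)) (remaining_temp : List Int) (i : Int) (current_cost : Int) (out : Int) : Decidable (Spec_backtrack air_conditioners remaining_temp i current_cost out) := by unfold Spec_backtrack; infer_instance

-- ===== CLAIM (what is proved, stated in full; the proofs are below) =====
def Claim_equal_backtrack : Prop := ∀ (air_conditioners : List (Int × Int × Int × Int)) (remaining_temp : List Int) (i : Int) (current_cost : Int), Dom_backtrack air_conditioners remaining_temp i current_cost → Pre_backtrack air_conditioners remaining_temp i current_cost → Spec_backtrack air_conditioners remaining_temp i current_cost (backtrack air_conditioners remaining_temp i current_cost)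

-- ===== LEMMAS AND PROOFS =====

/-- The ACs the recursion processes from cursor `i` on: positions `i, i+1, …` through Python indexing. -/
def procACs (acs : List (Int × Int × Int × Int)) (i : Int) (n : Nat) : List (Int × Int × Int × Int) :=
  (List.range n).map (fun (k : Nat) => (PySem.List.pyGet? acs (i + (k : Int))).getD (0, 0, 0, 0))

/-- Reference recursion: include/exclude on an explicit list of ACs. -/
def recMin : List (Int × Int × Int × Int) → List Int → Int → Int
  | [], t, c => checkTemps t c
  | x :: xs, t, c =>
      min (recMin xs t c) (recMin xs (subRange t x.1 x.2.1 x.2.2.1) (c + x.2.2.2))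

/-- Apply the subset of ACs selected by the bits of `mask` (low bit = head). -/
def decodeFold : List (Int × Int × Int × Int) → Nat → (List Int × Int) → (List Int × Int)
  | [], _, st => st
  | x :: xs, mask, st =>
      decodeFold xs (mask >>> 1)
        (if mask &&& 1 == 1 then (subRange st.1 x.1 x.2.1 x.2.2.1, st.2 + x.2.2.2) else st)

def leafVal (l : List (Int × Int × Int × Int)) (t : List Int) (c : Int) (mask : Nat) : Int :=
  if (decodeFold l mask (t, c)).1.all (fun x => x ≤ 0) then (decodeFold l mask (t, c)).2 else pyINF

/-- min of two optional values, `none` acting as +∞. -/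
def mergeOpt : Option Int → Option Int → Option Int
  | none, y => y
  | x, none => x
  | some a, some b => some (min a b)

def listMin : List Int → Option Int
  | [] => none
  | x :: xs => some (xs.foldl min x)

theorem min?_id_eq_listMin (xs : List Int) :
    PySem.List.min? xs (fun x => x) = listMin xs := by
  cases xs with
  | nil => rfl
  | cons x t => rw [PySem.List.min?_id_cons]; rfl

def maskMin (l : List (Int × Int × Int × Int)) (t : List Int) (c : Int) : Option Int :=
  listMin ((List.range (2 ^ l.length)).map (leafVal l t c))

theorem checkTemps_eq (t : List Int) (c : Int) :
    checkTemps t c = if t.all (fun x => x ≤ 0) then c else pyINF := by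
  induction t with
  | nil => simp [checkTemps]
  | cons x xs ih =>
    by_cases h : x > 0
    · simp [checkTemps, h, show ¬ (x ≤ 0) by omega]
    · simp [checkTemps, h, show x ≤ 0 by omega, ih]

theorem mergeOpt_assoc (x y z : Option Int) :
    mergeOpt (mergeOpt x y) z = mergeOpt x (mergeOpt y z) := by
  cases x <;> cases y <;> cases z <;> simp [mergeOpt, min_assoc]

theorem foldl_min_some (xs : List Int) (a : Int) :
    xs.foldl (fun x v => mergeOpt x (some v)) (some a) = some (xs.foldl min a) := by
  induction xs generalizing a with
  | nil => rfl
  | cons y ys ih =>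
    rw [List.foldl_cons, List.foldl_cons, show mergeOpt (some a) (some y) = some (min a y) from rfl, ih]

theorem listMin_eq_foldl (l : List Int) :
    listMin l = l.foldl (fun x v => mergeOpt x (some v)) none := by
  cases l with
  | nil => rfl
  | cons x xs =>
    rw [listMin, List.foldl_cons, show mergeOpt none (some x) = some x from rfl, foldl_min_some]

theorem foldl_merge_shift (l : List Int) (x : Option Int) :
    l.foldl (fun x v => mergeOpt x (some v)) x
      = mergeOpt x (l.foldl (fun x v => mergeOpt x (some v)) none) := by
  induction l generalizing x with
  | nil => cases x <;> rfl
  | cons a l ih =>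
    simp only [List.foldl_cons]
    rw [ih (mergeOpt x (some a)), ih (mergeOpt none (some a)), mergeOpt_assoc]
    rfl

theorem listMin_append (l₁ l₂ : List Int) :
    listMin (l₁ ++ l₂) = mergeOpt (listMin l₁) (listMin l₂) := by
  rw [listMin_eq_foldl, listMin_eq_foldl, listMin_eq_foldl, List.foldl_append,
    foldl_merge_shift]

theorem listMin_perm (l₁ l₂ : List Int) (h : l₁.Perm l₂) : listMin l₁ = listMin l₂ := by
  rw [listMin_eq_foldl, listMin_eq_foldl]
  refine @List.Perm.foldl_eq _ _ _ _ _ ⟨fun b a a' => ?_⟩ h none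
  cases b <;> simp [mergeOpt, min_comm, min_left_comm]

theorem perm_range_two_mul (k : Nat) :
    (List.range (2 * k)).Perm
      ((List.range k).map (fun q => 2 * q) ++ (List.range k).map (fun q => 2 * q + 1)) := by
  induction k with
  | zero => simp
  | succ k ih =>
    have h1 : List.range (2 * (k + 1)) = (List.range (2 * k) ++ [2 * k]) ++ [2 * k + 1] := by
      rw [show 2 * (k + 1) = (2 * k + 1) + 1 by ring, List.range_succ, List.range_succ]
    rw [h1, List.range_succ]
    simp only [List.map_append, List.map_cons, List.map_nil]
    refine ((ih.append_right _).append_right _).trans ?_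
    simp [List.perm_append_left_iff, List.append_assoc]

theorem decodeFold_even (x : Int × Int × Int × Int) (xs : List (Int × Int × Int × Int)) (q : Nat) (st : List Int × Int) :
    decodeFold (x :: xs) (2 * q) st = decodeFold xs q st := by
  have h1 : (2 * q) &&& 1 = 0 := by rw [Nat.and_one_is_mod]; omega
  have h2 : (2 * q) >>> 1 = q := by rw [Nat.shiftRight_one]; omega
  simp [decodeFold, h1, h2]

theorem decodeFold_odd (x : Int × Int × Int × Int) (xs : List (Int × Int × Int × Int)) (q : Nat) (st : List Int × Int) :
    decodeFold (x :: xs) (2 * q + 1) st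
      = decodeFold xs q (subRange st.1 x.1 x.2.1 x.2.2.1, st.2 + x.2.2.2) := by
  have h1 : (2 * q + 1) &&& 1 = 1 := by rw [Nat.and_one_is_mod]; omega
  have h2 : (2 * q + 1) >>> 1 = q := by rw [Nat.shiftRight_one]; omega
  simp [decodeFold, h1, h2]

theorem maskMin_cons (x : Int × Int × Int × Int) (xs : List (Int × Int × Int × Int)) (t : List Int) (c : Int) :
    maskMin (x :: xs) t c
      = mergeOpt (maskMin xs t c) (maskMin xs (subRange t x.1 x.2.1 x.2.2.1) (c + x.2.2.2)) := by
  unfold maskMin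
  rw [show (x :: xs).length = xs.length + 1 from rfl,
    show 2 ^ (xs.length + 1) = 2 * 2 ^ xs.length by ring,
    listMin_perm _ _ ((perm_range_two_mul _).map _),
    List.map_append, listMin_append, List.map_map, List.map_map]
  congr 1
  · congr 1
    apply List.map_congr_left
    intro q _
    simp only [Function.comp_apply, leafVal, decodeFold_even]
  · congr 1
    apply List.map_congr_left
    intro q _
    simp only [Function.comp_apply, leafVal, decodeFold_odd]

theorem some_recMin (l : List (Int × Int × Int × Int)) (t : List Int) (c : Int) :
    some (recMin l t c) = maskMin l t c := by
  induction l generalizing t c with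
  | nil =>
    simp [maskMin, listMin, leafVal, decodeFold, recMin, checkTemps_eq, List.range_one]
  | cons x xs ih =>
    rw [maskMin_cons, ← ih, ← ih]
    simp [recMin, mergeOpt]

theorem procACs_succ (acs : List (Int × Int × Int × Int)) (i : Int) (n : Nat) :
    procACs acs i (n + 1)
      = (PySem.List.pyGet? acs i).getD (0, 0, 0, 0) :: procACs acs (i + 1) n := by
  unfold procACs
  rw [List.range_succ_eq_map, List.map_cons, List.map_map]
  congr 1
  · norm_num
  · apply List.map_congr_left
    intro k _
    simp only [Function.comp_apply]
    congr 2
    push_cast [Nat.succ_eq_add_one]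
    ring

theorem backtrack_eq_recMin (acs : List (Int × Int × Int × Int)) (n : Nat) :
    ∀ (i : Int) (t : List Int) (c : Int),
      -(acs.length : Int) ≤ i → i ≤ (acs.length : Int) → n = ((acs.length : Int) - i).toNat →
      backtrack acs t i c = recMin (procACs acs i n) t c := by
  induction n with
  | zero =>
    intro i t c h1 h2 h3
    have hi : i = (acs.length : Int) := by omega
    rw [backtrack, dif_pos hi]
    simp [procACs, recMin]
  | succ n ih =>
    intro i t c h1 h2 h3
    have hi : i < (acs.length : Int) := by omega
    obtain ⟨⟨a, b, p, m⟩, hx⟩ : ∃ v, PySem.List.pyGet? acs i = some v := by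
      rcases hq : PySem.List.pyGet? acs i with _ | v
      · rw [PySem.List.pyGet?_eq_none_iff] at hq
        exact absurd ⟨h1, hi⟩ hq
      · exact ⟨v, rfl⟩
    rw [backtrack, dif_neg (by omega)]
    rw [procACs_succ, hx]
    simp only [Option.getD_some]
    simp only [recMin]
    rw [ih (i + 1) t c (by omega) (by omega) (by omega),
        ih (i + 1) (subRange t a b p) (c + m) (by omega) (by omega) (by omega)]

theorem inner_eq_decodeFold (acs : List (Int × Int × Int × Int)) (n : Nat) :
    ∀ (i : Int) (mask : Nat) (st : List Int × Int),
      -(acs.length : Int) ≤ i → (i + (n : Int)) ≤ (acs.length : Int) →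
      (List.range n).foldl (fun (st : List Int × Int) (k : Nat) =>
        if (mask >>> k) &&& 1 == 1 then
          match PySem.List.pyGet? acs (i + (k : Int)) with
          | none => st
          | some (a, b, p, m) => (subRange st.1 a b p, st.2 + m)
        else st) st
      = decodeFold (procACs acs i n) mask st := by
  induction n with
  | zero =>
    intro i mask st _ _
    simp [procACs, decodeFold]
  | succ n ih =>
    intro i mask st h1 h2
    push_cast at h2
    have hi : i < (acs.length : Int) := by omega
    obtain ⟨⟨a, b, p, m⟩, hx⟩ : ∃ v, PySem.List.pyGet? acs i = some v := by
      rcases hq : PySem.List.pyGet? acs i with _ | v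
      · rw [PySem.List.pyGet?_eq_none_iff] at hq
        exact absurd ⟨h1, hi⟩ hq
      · exact ⟨v, rfl⟩
    rw [procACs_succ, hx]
    simp only [Option.getD_some, decodeFold]
    rw [List.range_succ_eq_map, List.foldl_cons, List.foldl_map]
    simp only [Nat.shiftRight_zero, Nat.cast_zero, add_zero, hx]
    refine (PySem.List.foldl_congr_mem _ _ (g := fun (st : List Int × Int) (k : Nat) =>
      if ((mask >>> 1) >>> k) &&& 1 == 1 then
        match PySem.List.pyGet? acs ((i + 1) + (k : Int)) with
        | none => st
        | some (a, b, p, m) => (subRange st.1 a b p, st.2 + m)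
      else st) _ ?_).trans (ih (i + 1) (mask >>> 1) _ (by omega) (by omega))
    intro acc k _
    have e1 : mask >>> (k + 1) = (mask >>> 1) >>> k := by
      rw [← Nat.shiftRight_add]; ring_nf
    have e2 : i + (((k + 1) : ℕ) : ℤ) = (i + 1) + (k : ℤ) := by push_cast; ring
    simp only [Nat.succ_eq_add_one, e1, e2]

theorem backtrack_alt_eq_recMin (acs : List (Int × Int × Int × Int)) (i : Int) (t : List Int) (c : Int)
    (h1 : -(acs.length : Int) ≤ i) (h2 : i ≤ (acs.length : Int)) :
    backtrack_alt acs t i c = recMin (procACs acs i (((acs.length : Int) - i).toNat)) t c := by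
  have hcast : (((((acs.length : Int) - i).toNat) : Nat) : Int) = (acs.length : Int) - i := by
    omega
  unfold backtrack_alt
  dsimp only
  rw [PySem.List.foldl_append_singleton_eq_map, List.nil_append]
  rw [List.map_congr_left (fun mask _ => by
    rw [inner_eq_decodeFold acs (((acs.length : Int) - i).toNat) i mask (t, c) h1 (by omega)])]
  have hlen : (procACs acs i (((acs.length : Int) - i).toNat)).length
      = ((acs.length : Int) - i).toNat := by simp [procACs]
  rw [show (2 ^ (((acs.length : Int) - i).toNat))
      = 2 ^ (procACs acs i (((acs.length : Int) - i).toNat)).length by rw [hlen]]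
  rw [min?_id_eq_listMin]
  show (maskMin (procACs acs i (((acs.length : Int) - i).toNat)) t c).getD pyINF
      = recMin (procACs acs i (((acs.length : Int) - i).toNat)) t c
  rw [← some_recMin]
  rfl

-- ===== VERDICT (by name: the statement is the Claim_ definition above) =====
theorem backtrack_spec : Claim_equal_backtrack := by
  intro acs t i c _hDom hPre
  unfold Spec_backtrack
  rw [backtrack_eq_recMin acs (((acs.length : Int) - i).toNat) i t c hPre.1 hPre.2.1 rfl,
      backtrack_alt_eq_recMin acs i t c hPre.1 hPre.2.1]
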